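-- pv_equiv track=rewrite | github.com/WhissleAI/meta-asr | scripts/commonvoice_indian/process.py | get_age_bucket
-- ===== SOURCE A (Python) =====
-- def get_age_bucket(age_text: str) -> str:
--     age_to_number = {
--         'twenties': 25,
--         'thirties': 35,
--         'fourties': 45,
--         'fifties': 55,
--         'sixties': 65,
--         'seventies': 75,
--         'eighties': 85,
--         'nineties': 95
--     }
--     age = age_to_number.get(age_text.lower(), 20)
--     age_brackets = [
--         (18, "0_18"),
--         (30, "18_30"),
--         (45, "30_45"),
--         (60, "45_60"),
--         (float('inf'), "60PLUS")
--     ]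
--     for threshold, bracket in age_brackets:
--         if age < threshold:
--             return bracket
--     return "60PLUS"
-- ===== SOURCE B (Python) =====
-- def get_age_bucket(age_text: str) -> str:
--     bucket_of = {
--         'twenties': '18_30',
--         'thirties': '30_45',
--         'fourties': '45_60',
--         'fifties': '45_60',
--         'sixties': '60PLUS',
--         'seventies': '60PLUS',
--         'eighties': '60PLUS',
--         'nineties': '60PLUS',
--     }
--     return bucket_of.get(age_text.lower(), '18_30')
-- ===== Notes on version B (the rewrite author's own statement) =====
-- stated objective: simpler
-- what changed: Replaced the two-stage design (text->number dict, then a linear threshold scan over brackets) with a single precomputed text->bucket dict lookup with default '18_30'; no loop, no numeric intermediate.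
import Mathlib
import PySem

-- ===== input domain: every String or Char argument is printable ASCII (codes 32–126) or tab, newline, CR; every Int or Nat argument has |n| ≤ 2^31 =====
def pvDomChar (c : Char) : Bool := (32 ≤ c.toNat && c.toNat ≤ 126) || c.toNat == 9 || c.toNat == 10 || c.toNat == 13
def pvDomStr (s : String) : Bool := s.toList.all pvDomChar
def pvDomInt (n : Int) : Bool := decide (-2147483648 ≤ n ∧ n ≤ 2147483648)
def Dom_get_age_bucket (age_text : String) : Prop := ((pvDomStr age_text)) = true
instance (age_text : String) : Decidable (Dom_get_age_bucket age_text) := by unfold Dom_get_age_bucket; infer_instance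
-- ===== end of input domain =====

-- B replaces A's text→number dict plus threshold scan by one text→bucket dict lookup (objective: simpler).

-- ===== PORT A =====
-- threshold None models Python's float('inf'): age < inf is always true
def bracketScan (age : Int) : List (Option Int × String) → String
  | [] => "60PLUS"
  | (threshold, bracket) :: rest =>
    if (match threshold with | none => true | some t => age < t) then bracket
    else bracketScan age rest

def get_age_bucket (age_text : String) : String :=
  let age_to_number : PySem.Dict String Int := PySem.Dict.ofList
    [("twenties", 25), ("thirties", 35), ("fourties", 45), ("fifties", 55),
     ("sixties", 65), ("seventies", 75), ("eighties", 85), ("nineties", 95)]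
  let age := age_to_number.getD (PySem.Str.lower age_text) 20
  let age_brackets : List (Option Int × String) :=
    [(some 18, "0_18"), (some 30, "18_30"), (some 45, "30_45"),
     (some 60, "45_60"), (none, "60PLUS")]
  bracketScan age age_brackets

-- ===== PORT B =====
def get_age_bucket_alt (age_text : String) : String :=
  let bucket_of : PySem.Dict String String := PySem.Dict.ofList
    [("twenties", "18_30"), ("thirties", "30_45"), ("fourties", "45_60"),
     ("fifties", "45_60"), ("sixties", "60PLUS"), ("seventies", "60PLUS"),
     ("eighties", "60PLUS"), ("nineties", "60PLUS")]
  bucket_of.getD (PySem.Str.lower age_text) "18_30"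

-- ===== PRECONDITION & SPEC =====
def Spec_get_age_bucket (age_text : String) (out : String) : Prop := out = get_age_bucket_alt age_text
instance (age_text : String) (out : String) : Decidable (Spec_get_age_bucket age_text out) := by unfold Spec_get_age_bucket; infer_instance

-- ===== CLAIM (what is proved, stated in full; the proofs are below) =====
def Claim_equal_get_age_bucket : Prop := ∀ (age_text : String), Dom_get_age_bucket age_text → Spec_get_age_bucket age_text (get_age_bucket age_text)

-- ===== LEMMAS AND PROOFS =====
lemma pointwise (s : String) :
    get_age_bucket s = get_age_bucket_alt s := by
  by_cases h1 : PySem.Str.lower s = "twenties"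
  · unfold get_age_bucket get_age_bucket_alt; rw [h1]; rfl
  by_cases h2 : PySem.Str.lower s = "thirties"
  · unfold get_age_bucket get_age_bucket_alt; rw [h2]; rfl
  by_cases h3 : PySem.Str.lower s = "fourties"
  · unfold get_age_bucket get_age_bucket_alt; rw [h3]; rfl
  by_cases h4 : PySem.Str.lower s = "fifties"
  · unfold get_age_bucket get_age_bucket_alt; rw [h4]; rfl
  by_cases h5 : PySem.Str.lower s = "sixties"
  · unfold get_age_bucket get_age_bucket_alt; rw [h5]; rfl
  by_cases h6 : PySem.Str.lower s = "seventies"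
  · unfold get_age_bucket get_age_bucket_alt; rw [h6]; rfl
  by_cases h7 : PySem.Str.lower s = "eighties"
  · unfold get_age_bucket get_age_bucket_alt; rw [h7]; rfl
  by_cases h8 : PySem.Str.lower s = "nineties"
  · unfold get_age_bucket get_age_bucket_alt; rw [h8]; rfl
  unfold get_age_bucket get_age_bucket_alt
  have hA : (PySem.Dict.ofList
      [("twenties", (25:Int)), ("thirties", 35), ("fourties", 45), ("fifties", 55),
       ("sixties", 65), ("seventies", 75), ("eighties", 85), ("nineties", 95)]).items =
      [("twenties", (25:Int)), ("thirties", 35), ("fourties", 45), ("fifties", 55),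
       ("sixties", 65), ("seventies", 75), ("eighties", 85), ("nineties", 95)] := by rfl
  have hB : (PySem.Dict.ofList
      [("twenties", "18_30"), ("thirties", "30_45"), ("fourties", "45_60"),
       ("fifties", "45_60"), ("sixties", "60PLUS"), ("seventies", "60PLUS"),
       ("eighties", "60PLUS"), ("nineties", "60PLUS")]).items =
      [("twenties", "18_30"), ("thirties", "30_45"), ("fourties", "45_60"),
       ("fifties", "45_60"), ("sixties", "60PLUS"), ("seventies", "60PLUS"),
       ("eighties", "60PLUS"), ("nineties", "60PLUS")] := by rfl
  have e1 : ("twenties" == PySem.Str.lower s) = false := beq_eq_false_iff_ne.mpr (Ne.symm h1)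
  have e2 : ("thirties" == PySem.Str.lower s) = false := beq_eq_false_iff_ne.mpr (Ne.symm h2)
  have e3 : ("fourties" == PySem.Str.lower s) = false := beq_eq_false_iff_ne.mpr (Ne.symm h3)
  have e4 : ("fifties" == PySem.Str.lower s) = false := beq_eq_false_iff_ne.mpr (Ne.symm h4)
  have e5 : ("sixties" == PySem.Str.lower s) = false := beq_eq_false_iff_ne.mpr (Ne.symm h5)
  have e6 : ("seventies" == PySem.Str.lower s) = false := beq_eq_false_iff_ne.mpr (Ne.symm h6)
  have e7 : ("eighties" == PySem.Str.lower s) = false := beq_eq_false_iff_ne.mpr (Ne.symm h7)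
  have e8 : ("nineties" == PySem.Str.lower s) = false := beq_eq_false_iff_ne.mpr (Ne.symm h8)
  simp [PySem.Dict.getD_eq_get?_getD, PySem.Dict.get?, hA, hB, List.find?,
        e1, e2, e3, e4, e5, e6, e7, e8, bracketScan]

-- ===== VERDICT (by name: the statement is the Claim_ definition above) =====
theorem get_age_bucket_spec : Claim_equal_get_age_bucket := by
  intro s _
  exact pointwise s
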